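-- pv_equiv track=rewrite | github.com/castacks/config_helper | config_helper.py | remove_from_args_make_copy
-- ===== SOURCE A (Python) =====
-- def remove_from_args_make_copy(args, arg_name_dict):
--     '''
--     arg_name_dict is a dictionary that maps the name of an argument to the number of values after
--     that arguement. It assumes arguments with the same name have the same number of values. Number
--     of values could be zero.
--     '''
--     # flags is a list of booleans. If flags[i] is False, then args[i] is removed.
--     flags = []
--
--     # Loop over all the arguments present in args.
--     i = 0
--     while i < len(args):
--         arg = args[i]
--
--         if arg in arg_name_dict:
--             # number of arg/values to be removed including the argument itself.
--             arg_count = arg_name_dict[arg] + 1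
--
--             for _ in range( arg_count ):
--                 flags.append(False)
--
--             i += arg_count
--         else:
--             # Keep this arg.
--             flags.append(True)
--             i += 1
--
--     # Only keep the arguments with flag set to True.
--     return [ arg for arg, flag in zip(args, flags) if flag ]
-- ===== SOURCE B (Python) =====
-- def remove_from_args_make_copy(args, arg_name_dict):
--     # Single accumulation pass with a skip countdown: no index arithmetic,
--     # no boolean mask, no zip-filter phase.
--     result = []
--     skip = 0
--     for arg in args:
--         if skip:
--             skip -= 1
--         elif arg in arg_name_dict:
--             skip = arg_name_dict[arg]
--         else:
--             result.append(arg)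
--     return result
-- ===== Notes on version B (the rewrite author's own statement) =====
-- stated objective: simpler
-- what changed: Replaces the two-phase while-loop-with-index that builds a boolean mask and then zip-filters by a single for-each pass with a skip countdown that appends kept arguments directly.
-- outside the precondition, e.g. on remove_from_args_make_copy(['-a', 'x'], {'-a': 1, 'x': -2}): A returns [], B returns []
import Mathlib
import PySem

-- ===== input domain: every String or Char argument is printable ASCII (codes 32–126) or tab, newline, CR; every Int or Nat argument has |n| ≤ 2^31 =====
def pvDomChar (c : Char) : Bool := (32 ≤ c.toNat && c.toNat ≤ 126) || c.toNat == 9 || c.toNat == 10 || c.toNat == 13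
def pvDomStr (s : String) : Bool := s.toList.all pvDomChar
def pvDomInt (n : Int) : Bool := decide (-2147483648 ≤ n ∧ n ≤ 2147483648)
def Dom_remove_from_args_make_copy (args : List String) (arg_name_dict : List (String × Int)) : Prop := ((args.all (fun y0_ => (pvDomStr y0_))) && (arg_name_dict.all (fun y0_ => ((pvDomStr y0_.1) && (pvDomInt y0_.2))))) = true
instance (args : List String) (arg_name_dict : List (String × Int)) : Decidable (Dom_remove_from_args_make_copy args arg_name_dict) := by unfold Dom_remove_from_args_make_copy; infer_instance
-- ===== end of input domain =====

-- B replaces A's mask-then-zip-filter two-phase scan by a single for-each pass with a skip countdown (objective: simpler).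


-- ===== PORT A =====
-- first-match lookup in the association list standing for the Python dict
-- ('arg in arg_name_dict' / 'arg_name_dict[arg]')
def pvLookup (k : String) : List (String × Int) → Option Int
  | [] => none
  | (a, v) :: rest => if a = k then some v else pvLookup k rest

-- the 'while i < len(args)' loop of A, building flags; fuel bounds the iterations
-- (inside Pre_ every iteration advances i by at least 1, so fuel = len(args) is never exhausted)
def pvALoop (args : List String) (d : List (String × Int)) : Nat → Int → List Bool → List Bool
  | 0, _, flags => flags
  | fuel + 1, i, flags =>
    if i < (args.length : Int) then
      -- arg = args[i]; i is in range here by the loop guard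
      let arg := (PySem.List.pyGet? args i).getD ""
      match pvLookup arg d with
      | some v =>
        let arg_count := v + 1
        -- 'for _ in range(arg_count): flags.append(False)'
        pvALoop args d fuel (i + arg_count) (flags ++ List.replicate arg_count.toNat false)
      | none => pvALoop args d fuel (i + 1) (flags ++ [true])
    else flags

def remove_from_args_make_copy (args : List String) (arg_name_dict : List (String × Int)) : List String :=
  let flags := pvALoop args arg_name_dict args.length 0 []
  -- [ arg for arg, flag in zip(args, flags) if flag ]
  ((args.zip flags).filter (fun p => p.2)).map (fun p => p.1)

-- ===== PORT B =====
-- one step of B's for-each loop: state (result, skip)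
def pvBStep (d : List (String × Int)) (st : List String × Int) (arg : String) : List String × Int :=
  if st.2 ≠ 0 then (st.1, st.2 - 1)
  else
    match pvLookup arg d with
    | some v => (st.1, v)
    | none => (st.1 ++ [arg], st.2)

def remove_from_args_make_copy_alt (args : List String) (arg_name_dict : List (String × Int)) : List String :=
  (args.foldl (pvBStep arg_name_dict) ([], 0)).1

-- ===== PRECONDITION & SPEC =====
-- Pre_ excludes dictionaries that map some argument actually present in args to a negative
-- count: if A's loop reaches such an argument, arg_count ≤ 0 makes i stall or go backwards and
-- the while loop never terminates (if the negative-count argument is only ever skipped over, A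
-- returns and agrees with B — those inputs are excluded too, slightly narrowing Pre_).
def Pre_remove_from_args_make_copy (args : List String) (arg_name_dict : List (String × Int)) : Prop :=
  ∀ p ∈ arg_name_dict, p.1 ∈ args → 0 ≤ p.2
instance (args : List String) (arg_name_dict : List (String × Int)) : Decidable (Pre_remove_from_args_make_copy args arg_name_dict) := by unfold Pre_remove_from_args_make_copy; infer_instance

def pvWitness_remove_from_args_make_copy : List String × (List (String × Int)) :=
  (["-o", "out.txt", "keep", "-v"], [("-o", 1), ("-v", 0)])

def Spec_remove_from_args_make_copy (args : List String) (arg_name_dict : List (String × Int)) (out : List String) : Prop := out = remove_from_args_make_copy_alt args arg_name_dict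
instance (args : List String) (arg_name_dict : List (String × Int)) (out : List String) : Decidable (Spec_remove_from_args_make_copy args arg_name_dict out) := by unfold Spec_remove_from_args_make_copy; infer_instance

-- ===== CLAIM (what is proved, stated in full; the proofs are below) =====
def Claim_equal_remove_from_args_make_copy : Prop := ∀ (args : List String) (arg_name_dict : List (String × Int)), Dom_remove_from_args_make_copy args arg_name_dict → Pre_remove_from_args_make_copy args arg_name_dict → Spec_remove_from_args_make_copy args arg_name_dict (remove_from_args_make_copy args arg_name_dict)

-- ===== LEMMAS AND PROOFS =====

-- common functional specification: remove, recursively, a recognised argument together with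
-- the next (count) arguments
def pvSpec (d : List (String × Int)) : List String → List String
  | [] => []
  | a :: rest =>
    match pvLookup a d with
    | some v => pvSpec d (rest.drop v.toNat)
    | none => a :: pvSpec d rest
termination_by xs => xs.length
decreasing_by
  all_goals simp only [List.length_cons, List.length_drop]
  all_goals omega

lemma pvLookup_mem {k : String} {l : List (String × Int)} {v : Int}
    (h : pvLookup k l = some v) : (k, v) ∈ l := by
  induction l with
  | nil => simp [pvLookup] at h
  | cons p rest ih =>
    obtain ⟨a, w⟩ := p
    by_cases hak : a = k
    · subst hak
      simp [pvLookup] at h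
      simp [h]
    · simp [pvLookup, hak] at h
      exact List.mem_cons_of_mem _ (ih h)

-- the zip-filter-map phase of A
def pvKept (xs : List String) (fs : List Bool) : List String :=
  ((xs.zip fs).filter (fun p => p.2)).map (fun p => p.1)

lemma pvKept_nil (xs : List String) : pvKept xs [] = [] := by
  simp [pvKept]

lemma pvKept_replicate_false (xs : List String) (k : Nat) :
    pvKept xs (List.replicate k false) = [] := by
  induction xs generalizing k with
  | nil => simp [pvKept]
  | cons a t ih =>
    cases k with
    | zero => simp [pvKept]
    | succ k' =>
      simp only [List.replicate_succ]
      simpa [pvKept] using ih k'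

lemma pvKept_append (fs : List Bool) (xs : List String) (gs : List Bool)
    (h : fs.length ≤ xs.length) :
    pvKept xs (fs ++ gs) = pvKept xs fs ++ pvKept (xs.drop fs.length) gs := by
  induction fs generalizing xs with
  | nil => simp [pvKept_nil]
  | cons f fs' ih =>
    cases xs with
    | nil => simp at h
    | cons x xs' =>
      simp only [List.length_cons] at h
      cases f <;>
        simpa [pvKept, List.zip_cons_cons] using ih xs' (by omega)

lemma pvKept_single_true (a : String) (rest : List String) :
    pvKept (a :: rest) [true] = [a] := by
  simp [pvKept]

-- A's loop, read through the zip-filter phase, computes pvSpec of the unprocessed suffix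
lemma pvALoop_spec (args : List String) (d : List (String × Int))
    (hPre : ∀ p ∈ d, p.1 ∈ args → 0 ≤ p.2) :
    ∀ (fuel n : Nat) (flags : List Bool), flags.length = n → args.length ≤ fuel + n →
      pvKept args (pvALoop args d fuel (n : Int) flags) =
        pvKept args flags ++ pvSpec d (args.drop n) := by
  intro fuel
  induction fuel with
  | zero =>
    intro n flags hlen hfuel
    have : args.drop n = [] := List.drop_eq_nil_of_le (by omega)
    simp [pvALoop, this, pvSpec]
  | succ fuel ih =>
    intro n flags hlen hfuel
    by_cases hn : n < args.length
    · have hdrop : args.drop n = args[n] :: args.drop (n + 1) :=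
        List.drop_eq_getElem_cons hn
      have hguard : (n : Int) < (args.length : Int) := by exact_mod_cast hn
      cases hl : pvLookup args[n] d with
      | some v =>
        have hv : 0 ≤ v := hPre _ (pvLookup_mem hl) (by exact List.getElem_mem hn)
        have hcount : ((n : Int) + (v + 1)) = ((n + (v.toNat + 1) : Nat) : Int) := by
          push_cast
          omega
        have hrepl : (v + 1).toNat = v.toNat + 1 := by omega
        have hlen' : (flags ++ List.replicate (v + 1).toNat false).length
            = n + (v.toNat + 1) := by
          simp [hlen, hrepl]
        have hfuel' : args.length ≤ fuel + (n + (v.toNat + 1)) := by omega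
        have := ih (n + (v.toNat + 1)) (flags ++ List.replicate (v + 1).toNat false)
          hlen' hfuel'
        rw [show pvALoop args d (fuel + 1) (n : Int) flags
              = pvALoop args d fuel ((n : Int) + (v + 1))
                  (flags ++ List.replicate (v + 1).toNat false) by
            simp [pvALoop, hguard, hl, List.getElem?_eq_getElem hn]]
        rw [hcount, this]
        have hkeep : pvKept args (flags ++ List.replicate (v + 1).toNat false)
            = pvKept args flags := by
          rw [pvKept_append _ _ _ (by omega), hlen, pvKept_replicate_false,
            List.append_nil]
        rw [hkeep]
        congr 1
        rw [hdrop]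
        simp only [pvSpec, hl]
        rw [List.drop_drop]
        congr 1
        rw [show n + (v.toNat + 1) = n + 1 + v.toNat from by omega]
      | none =>
        have hlen' : (flags ++ [true]).length = n + 1 := by simp [hlen]
        have hfuel' : args.length ≤ fuel + (n + 1) := by omega
        have := ih (n + 1) (flags ++ [true]) hlen' hfuel'
        rw [show pvALoop args d (fuel + 1) (n : Int) flags
              = pvALoop args d fuel ((n : Int) + 1) (flags ++ [true]) by
            simp [pvALoop, hguard, hl, List.getElem?_eq_getElem hn]]
        rw [show ((n : Int) + 1) = ((n + 1 : Nat) : Int) by push_cast; ring, this]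
        rw [pvKept_append _ _ _ (by omega), hlen, hdrop, pvKept_single_true]
        rw [List.append_assoc]
        congr 1
        simp only [pvSpec, hl]
        rfl
    · have hguard : ¬ ((n : Int) < (args.length : Int)) := by exact_mod_cast hn
      have : args.drop n = [] := List.drop_eq_nil_of_le (by omega)
      simp [pvALoop, hguard, this, pvSpec]

-- B's fold, started with skip = k, computes pvSpec of the list with the first k elements dropped
lemma pvBFold_spec (args : List String) (d : List (String × Int))
    (hPre : ∀ p ∈ d, p.1 ∈ args → 0 ≤ p.2) :
    ∀ (xs : List String), (∀ x ∈ xs, x ∈ args) →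
      ∀ (acc : List String) (k : Nat),
        (xs.foldl (pvBStep d) (acc, (k : Int))).1 = acc ++ pvSpec d (xs.drop k) := by
  intro xs
  induction xs with
  | nil => intro _ acc k; simp [pvSpec]
  | cons a rest ih =>
    intro hsub acc k
    have hsub' : ∀ x ∈ rest, x ∈ args := fun x hx => hsub x (List.mem_cons_of_mem _ hx)
    cases k with
    | zero =>
      cases hl : pvLookup a d with
      | some v =>
        have hv : 0 ≤ v := hPre _ (pvLookup_mem hl) (hsub a (List.mem_cons_self))
        have hstep : pvBStep d (acc, ((0 : Nat) : Int)) a = (acc, ((v.toNat : Nat) : Int)) := by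
          simp [pvBStep, hl, Int.toNat_of_nonneg hv]
        rw [List.foldl_cons, hstep, ih hsub' acc v.toNat]
        simp [pvSpec, hl]
      | none =>
        have hstep : pvBStep d (acc, ((0 : Nat) : Int)) a = (acc ++ [a], ((0 : Nat) : Int)) := by
          simp [pvBStep, hl]
        rw [List.foldl_cons, hstep, ih hsub' (acc ++ [a]) 0]
        simp [pvSpec, hl]
    | succ k' =>
      have hstep : pvBStep d (acc, ((k' + 1 : Nat) : Int)) a = (acc, ((k' : Nat) : Int)) := by
        have h1 : ¬ (((k' + 1 : Nat) : Int) = 0) := by push_cast; omega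
        have h2 : ((k' + 1 : Nat) : Int) - 1 = ((k' : Nat) : Int) := by push_cast; ring
        unfold pvBStep
        rw [if_pos h1, h2]
      rw [List.foldl_cons, hstep, ih hsub' acc k']
      rfl

-- ===== VERDICT (by name: the statement is the Claim_ definition above) =====
theorem remove_from_args_make_copy_spec : Claim_equal_remove_from_args_make_copy := by
  unfold Claim_equal_remove_from_args_make_copy
  intro args d _ hPre
  unfold Spec_remove_from_args_make_copy
  have hA : remove_from_args_make_copy args d
      = pvKept args (pvALoop args d args.length ((0 : Nat) : Int) []) := by
    simp [remove_from_args_make_copy, pvKept]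
  have hA' := pvALoop_spec args d hPre args.length 0 [] rfl (by omega)
  have hB := pvBFold_spec args d hPre args (fun _ hx => hx) [] 0
  rw [hA, hA', pvKept_nil, List.nil_append, List.drop_zero]
  rw [remove_from_args_make_copy_alt]
  simp only [Nat.cast_zero] at hB
  rw [hB]
  simp
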